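-- pv_equiv track=rewrite | github.com/esnorki2008/MinorC | Contenido/Optimo.py | quitar_etiquetas_sin_saltos
-- ===== SOURCE A (Python) =====
-- def quitar_etiquetas_sin_saltos(lst:[]):
--     salida = []
--     etiquetas = []
--     saltos = []
--     for cada in lst :
--         if cada.find(":") != -1:
--             etiquetas.append(cada)
--         elif cada.find("goto") != -1:
--            saltos.append((cada.split("goto")[1]).replace(";","").strip())
--
--     eti_perm = []
--     eti_perm.append("main:")
--     for eti in etiquetas:
--         for sal in saltos:
--             if eti.find(sal)!=-1:
--                 eti_perm.append(eti)
--                 break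
--
--
--     for cada in lst :
--         if cada.find(":") != -1:
--             for eq in eti_perm:
--                 if eq ==cada:
--                     salida.append(cada)
--                     break
--         else:
--             salida.append(cada)
--
--     return salida
-- ===== SOURCE B (Python) =====
-- def quitar_etiquetas_sin_saltos(lst: []):
--     n = len(lst)
--     keep = [lst[i].find(":") == -1 or lst[i] == "main:" for i in range(n)]
--     for i in range(n):
--         if lst[i].find(":") == -1 and lst[i].find("goto") != -1:
--             sal = lst[i].split("goto")[1].replace(";", "").strip()
--             for j in range(n):
--                 if not keep[j] and sal in lst[j]:
--                     keep[j] = True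
--     return [lst[i] for i in range(n) if keep[i]]
-- ===== Notes on version B (the rewrite author's own statement) =====
-- stated objective: alternative
-- what changed: B inverts the loop nesting and changes the data structure: instead of A's label list, permitted-label table and table-membership filter, B keeps a positional boolean keep-array seeded with non-label lines and 'main:', marks label positions in an inner sweep each time a goto target is extracted in the outer sweep, and finally emits the kept positions.
import Mathlib
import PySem

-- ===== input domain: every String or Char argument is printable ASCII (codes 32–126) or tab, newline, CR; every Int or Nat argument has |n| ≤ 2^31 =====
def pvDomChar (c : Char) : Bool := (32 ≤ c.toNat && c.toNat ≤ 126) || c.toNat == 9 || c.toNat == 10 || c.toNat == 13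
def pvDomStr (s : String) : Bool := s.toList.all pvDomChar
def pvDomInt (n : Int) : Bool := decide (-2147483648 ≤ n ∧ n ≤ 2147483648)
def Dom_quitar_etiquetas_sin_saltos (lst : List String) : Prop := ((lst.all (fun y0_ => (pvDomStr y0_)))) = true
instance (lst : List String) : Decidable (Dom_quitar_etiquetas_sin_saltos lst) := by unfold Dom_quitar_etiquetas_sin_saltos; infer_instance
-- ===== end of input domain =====

-- B replaces A's build-label-tables-then-filter-by-membership algorithm with a positional
-- boolean keep-array: seed it with non-labels and "main:", mark label positions in an inner
-- sweep per extracted goto target (inverted loop nesting), emit kept positions; objective: alternative.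

-- ===== PORT A =====
-- shared line classifiers / target extraction, exact PySem renderings of the Python expressions
def pvIsLabel (s : String) : Bool := PySem.Str.find s ":" != -1
def pvHasGoto (s : String) : Bool := PySem.Str.find s "goto" != -1
-- (cada.split("goto")[1]).replace(";","").strip() — the [1] is guarded by the 'goto' test, so getD never hits its default
def pvTarget (s : String) : String :=
  PySem.Str.strip (PySem.Str.replace (((PySem.Str.split? s "goto").getD []).getD 1 "") ";" "")

-- first loop of A: build (etiquetas, saltos)
def pvPass1 (lst : List String) : List String × List String :=
  lst.foldl (fun acc cada =>
    if pvIsLabel cada then (acc.1 ++ [cada], acc.2)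
    else if pvHasGoto cada then (acc.1, acc.2 ++ [pvTarget cada])
    else acc) ([], [])

-- second loop of A: eti_perm (inner for-with-break appends eti iff some sal matches)
def pvPass2 (etiquetas saltos : List String) : List String :=
  etiquetas.foldl (fun acc eti =>
    if saltos.any (fun sal => PySem.Str.find eti sal != -1) then acc ++ [eti] else acc)
    ["main:"]

def quitar_etiquetas_sin_saltos (lst : List String) : List String :=
  let p := pvPass1 lst
  let eti_perm := pvPass2 p.1 p.2
  -- third loop of A (inner for-with-break appends cada iff some eq == cada)
  lst.foldl (fun salida cada =>
    if pvIsLabel cada then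
      if eti_perm.any (fun eq => eq == cada) then salida ++ [cada] else salida
    else salida ++ [cada]) []

-- ===== PORT B =====
-- inner sweep of B: for j in range(n): if not keep[j] and sal in lst[j]: keep[j] = True
def pvMark (sal : String) (lst : List String) (keep : List Bool) : List Bool :=
  (lst.zip keep).map (fun p => if !p.2 && PySem.Str.isIn sal p.1 then true else p.2)

def quitar_etiquetas_sin_saltos_alt (lst : List String) : List String :=
  -- keep = [lst[i].find(":") == -1 or lst[i] == "main:" for i in range(n)]
  let keep0 := lst.map (fun s => !pvIsLabel s || s == "main:")
  -- outer sweep: on each non-label goto line, extract the target and mark label positions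
  let keep := lst.foldl (fun keep cada =>
    if !pvIsLabel cada && pvHasGoto cada then pvMark (pvTarget cada) lst keep
    else keep) keep0
  -- return [lst[i] for i in range(n) if keep[i]]
  (lst.zip keep).filterMap (fun p => if p.2 then some p.1 else none)

-- ===== PRECONDITION & SPEC =====
def Spec_quitar_etiquetas_sin_saltos (lst : List String) (out : List String) : Prop := out = quitar_etiquetas_sin_saltos_alt lst
instance (lst : List String) (out : List String) : Decidable (Spec_quitar_etiquetas_sin_saltos lst out) := by unfold Spec_quitar_etiquetas_sin_saltos; infer_instance

-- ===== CLAIM (what is proved, stated in full; the proofs are below) =====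
def Claim_equal_quitar_etiquetas_sin_saltos : Prop := ∀ (lst : List String), Dom_quitar_etiquetas_sin_saltos lst → Spec_quitar_etiquetas_sin_saltos lst (quitar_etiquetas_sin_saltos lst)

-- ===== LEMMAS AND PROOFS =====

-- the goto-target list both algorithms extract
def pvSaltos (lst : List String) : List String :=
  lst.filterMap (fun cada =>
    if !pvIsLabel cada && pvHasGoto cada then some (pvTarget cada) else none)

-- A's first loop computes the label filter and the target list
lemma pvPass1_aux (lst : List String) : ∀ (a b : List String),
    lst.foldl (fun acc cada =>
      if pvIsLabel cada then (acc.1 ++ [cada], acc.2)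
      else if pvHasGoto cada then (acc.1, acc.2 ++ [pvTarget cada])
      else acc) (a, b)
    = (a ++ lst.filter pvIsLabel, b ++ pvSaltos lst) := by
  induction lst with
  | nil => simp [pvSaltos]
  | cons h t ih =>
    intro a b
    by_cases hl : pvIsLabel h = true <;> by_cases hg : pvHasGoto h = true <;>
      simp [pvSaltos, hl, hg, ih]

lemma pvPass1_eq (lst : List String) :
    pvPass1 lst = (lst.filter pvIsLabel, pvSaltos lst) := by
  rw [pvPass1]
  simpa using pvPass1_aux lst [] []

-- A's second loop is "main:" followed by the labels matching some target
lemma pvPass2_eq (etiquetas saltos : List String) :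
    pvPass2 etiquetas saltos =
      "main:" :: etiquetas.filter (fun eti => saltos.any (fun sal => PySem.Str.find eti sal != -1)) := by
  rw [pvPass2, PySem.List.foldl_append_if_eq_filter]
  rfl

-- A equals a direct filter by "non-label, or main:, or contains some target"
lemma A_eq_filter (lst : List String) :
    quitar_etiquetas_sin_saltos lst =
      lst.filter (fun cada => !pvIsLabel cada || cada == "main:"
        || (pvSaltos lst).any (fun sal => PySem.Str.isIn sal cada)) := by
  rw [quitar_etiquetas_sin_saltos]
  simp only [pvPass1_eq, pvPass2_eq]
  generalize hs : pvSaltos lst = saltos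
  generalize he : ("main:" :: (lst.filter pvIsLabel).filter (fun eti => saltos.any (fun sal => PySem.Str.find eti sal != -1))) = eti_perm
  have h1 : (lst.foldl (fun salida cada =>
       if pvIsLabel cada then
         if eti_perm.any (fun eq => eq == cada) then salida ++ [cada] else salida
       else salida ++ [cada]) [])
      = lst.filter (fun cada => !pvIsLabel cada || eti_perm.any (fun eq => eq == cada)) := by
    calc (lst.foldl (fun salida cada =>
       if pvIsLabel cada then
         if eti_perm.any (fun eq => eq == cada) then salida ++ [cada] else salida
       else salida ++ [cada]) [])
        = lst.foldl (fun salida cada =>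
            if (!pvIsLabel cada || eti_perm.any (fun eq => eq == cada)) then salida ++ [cada] else salida) [] := by
          apply PySem.List.foldl_congr_mem
          intro acc x _
          by_cases hl : pvIsLabel x = true <;> simp [hl]
      _ = lst.filter (fun cada => !pvIsLabel cada || eti_perm.any (fun eq => eq == cada)) := by
          rw [PySem.List.foldl_append_if_eq_filter]; rfl
  rw [h1]
  apply List.filter_congr
  intro x hx
  by_cases hl : pvIsLabel x = true
  · simp only [hl, Bool.not_true, Bool.false_or]
    rw [← he]
    simp only [List.any_cons]
    have hmem : ((lst.filter pvIsLabel).filter (fun eti => saltos.any (fun sal => PySem.Str.find eti sal != -1))).any (fun eq => eq == x)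
        = saltos.any (fun sal => PySem.Str.find x sal != -1) := by
      by_cases hq : (saltos.any (fun sal => PySem.Str.find x sal != -1)) = true
      · rw [hq, List.any_eq_true]
        refine ⟨x, ?_, by simp⟩
        simp only [List.mem_filter]
        exact ⟨⟨hx, hl⟩, hq⟩
      · have hq' : (saltos.any (fun sal => PySem.Str.find x sal != -1)) = false :=
          eq_false_of_ne_true hq
        rw [hq', List.any_eq_false]
        intro a ha
        simp only [List.mem_filter] at ha
        simp only [beq_iff_eq]
        rintro rfl
        exact hq ha.2
    rw [hmem]
    have hcong : (fun sal => PySem.Str.find x sal != -1) = (fun sal => PySem.Str.isIn sal x) := by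
      funext sal
      rw [Bool.eq_iff_iff, bne_iff_ne]
      simp [PySem.Chars.isIn_iff_infix, PySem.Chars.find_ne_neg_one_iff]
    rw [hcong]
    have hms : (("main:" : String) == x) = (x == "main:") := by simp [eq_comm]
    rw [hms]
  · simp [hl]

-- one inner sweep over a keep-array of the form lst.map f just disjoins "contains sal" pointwise
lemma pvMark_map (sal : String) (lst : List String) (f : String → Bool) :
    pvMark sal lst (lst.map f) = lst.map (fun s => f s || PySem.Str.isIn sal s) := by
  induction lst with
  | nil => rfl
  | cons h t ih =>
    simp only [pvMark, List.map_cons, List.zip_cons_cons] at *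
    rw [ih]
    congr 1
    by_cases hf : f h = true <;> simp [hf]

-- B's outer sweep yields the pointwise "seed or contains some extracted target" array
lemma foldl_mark (lst : List String) : ∀ (it : List String) (f : String → Bool),
    it.foldl (fun keep cada =>
      if !pvIsLabel cada && pvHasGoto cada then pvMark (pvTarget cada) lst keep
      else keep) (lst.map f)
    = lst.map (fun s => f s || (pvSaltos it).any (fun sal => PySem.Str.isIn sal s)) := by
  intro it
  induction it with
  | nil => intro f; simp [pvSaltos]
  | cons h t ih =>
    intro f
    by_cases h1 : pvIsLabel h = true
    · rw [List.foldl_cons, if_neg (by simp [h1]), ih]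
      apply List.map_congr_left
      intro s _
      simp [pvSaltos, h1]
    · by_cases h2 : pvHasGoto h = true
      · rw [List.foldl_cons, if_pos (by simp [h1, h2]), pvMark_map, ih]
        apply List.map_congr_left
        intro s _
        simp [pvSaltos, h1, h2, Bool.or_assoc]
      · rw [List.foldl_cons, if_neg (by simp [h2]), ih]
        apply List.map_congr_left
        intro s _
        simp [pvSaltos, h1, h2]

-- emitting kept positions of a pointwise keep-array is a filter
lemma filterMap_zip_map (lst : List String) (p : String → Bool) :
    (lst.zip (lst.map p)).filterMap (fun q => if q.2 then some q.1 else none)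
      = lst.filter p := by
  induction lst with
  | nil => rfl
  | cons h t ih =>
    simp only [List.map_cons, List.zip_cons_cons, List.filterMap_cons, List.filter_cons]
    by_cases hp : p h = true <;> simp [hp, ih]

lemma B_eq_filter (lst : List String) :
    quitar_etiquetas_sin_saltos_alt lst =
      lst.filter (fun cada => !pvIsLabel cada || cada == "main:"
        || (pvSaltos lst).any (fun sal => PySem.Str.isIn sal cada)) := by
  rw [quitar_etiquetas_sin_saltos_alt]
  simp only [foldl_mark, filterMap_zip_map]

-- ===== VERDICT (by name: the statement is the Claim_ definition above) =====
theorem quitar_etiquetas_sin_saltos_spec : Claim_equal_quitar_etiquetas_sin_saltos := by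
  intro lst _
  unfold Spec_quitar_etiquetas_sin_saltos
  rw [A_eq_filter, B_eq_filter]
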